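-- pv_equiv track=rewrite | github.com/EMPSCK/BlueCacatooAPI | GenerationLists/logic.py | relatives_list_change
-- ===== SOURCE A (Python) =====
-- def relatives_list_change(relatives_list):
--
--     relatives_dict = {}
--     for i in relatives_list:
--         if i['id'] in relatives_dict:
--             relatives_dict[i['id']].append(i['relative_id'])
--         else:
--             relatives_dict[i['id']] = list()
--             relatives_dict[i['id']].append(i['relative_id'])
--
--     return relatives_dict
-- ===== SOURCE B (Python) =====
-- def relatives_list_change(relatives_list):
--     ids = list(dict.fromkeys(i['id'] for i in relatives_list))
--     return {k: [i['relative_id'] for i in relatives_list if i['id'] == k] for k in ids}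
-- ===== Notes on version B (the rewrite author's own statement) =====
-- stated objective: alternative
-- what changed: A builds the grouping dict in one accumulating pass (append-or-create per element); B first deduplicates the ids (dict.fromkeys) and then builds the result as a dict comprehension whose value for each id is a filtering re-scan of the whole list.
import Mathlib
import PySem

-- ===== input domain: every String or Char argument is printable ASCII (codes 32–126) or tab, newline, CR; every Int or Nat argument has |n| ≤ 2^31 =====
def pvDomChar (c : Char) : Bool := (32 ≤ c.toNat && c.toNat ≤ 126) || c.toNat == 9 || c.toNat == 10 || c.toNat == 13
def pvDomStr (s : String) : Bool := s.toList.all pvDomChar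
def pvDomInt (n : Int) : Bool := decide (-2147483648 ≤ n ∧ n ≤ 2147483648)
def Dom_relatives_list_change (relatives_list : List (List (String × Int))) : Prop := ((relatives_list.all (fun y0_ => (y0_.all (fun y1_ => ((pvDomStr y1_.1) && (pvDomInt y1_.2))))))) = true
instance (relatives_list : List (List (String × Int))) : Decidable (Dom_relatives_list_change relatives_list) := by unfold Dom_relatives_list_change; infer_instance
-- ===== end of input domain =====

-- B replaces A's single accumulating dict-building pass by a dedup of the ids followed by a
-- per-id filtering re-scan (dict comprehension); same return value, objective: alternative.

-- ===== PORT A =====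
-- i['id'] / i['relative_id'] raise KeyError when absent: Pre_ excludes those inputs; the
-- '.getD 0' completion is never reached inside Pre_.
def relatives_list_change (relatives_list : List (List (String × Int))) : List (Int × List Int) :=
  (relatives_list.foldl (fun relatives_dict i =>
      let k := ((PySem.Dict.mk i).get? "id").getD 0
      let r := ((PySem.Dict.mk i).get? "relative_id").getD 0
      if relatives_dict.contains k then
        relatives_dict.modify k [] (fun v => v ++ [r])
      else
        (relatives_dict.insert k []).modify k [] (fun v => v ++ [r])
    ) PySem.Dict.empty).items

-- ===== PORT B =====
def relatives_list_change_alt (relatives_list : List (List (String × Int))) : List (Int × List Int) :=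
  let ids := PySem.List.dedup (relatives_list.map (fun i => ((PySem.Dict.mk i).get? "id").getD 0))
  ids.map (fun k => (k,
    (relatives_list.filter (fun i => ((PySem.Dict.mk i).get? "id").getD 0 == k)).map
      (fun i => ((PySem.Dict.mk i).get? "relative_id").getD 0)))

-- ===== PRECONDITION & SPEC =====
-- Pre_ excludes exactly the inputs where the Python raises KeyError: an element without an
-- 'id' key or without a 'relative_id' key.
def Pre_relatives_list_change (relatives_list : List (List (String × Int))) : Prop :=
  ∀ i ∈ relatives_list,
    (PySem.Dict.mk i).contains "id" = true ∧ (PySem.Dict.mk i).contains "relative_id" = true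
instance (relatives_list : List (List (String × Int))) : Decidable (Pre_relatives_list_change relatives_list) := by unfold Pre_relatives_list_change; infer_instance
def pvWitness_relatives_list_change : (List (List (String × Int))) :=
  ([[("id", 1), ("relative_id", 2)], [("id", 1), ("relative_id", 3)], [("id", 4), ("relative_id", 2)]])
def Spec_relatives_list_change (relatives_list : List (List (String × Int))) (out : List (Int × List Int)) : Prop := out = relatives_list_change_alt relatives_list
instance (relatives_list : List (List (String × Int))) (out : List (Int × List Int)) : Decidable (Spec_relatives_list_change relatives_list out) := by unfold Spec_relatives_list_change; infer_instance

-- ===== CLAIM (what is proved, stated in full; the proofs are below) =====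
def Claim_equal_relatives_list_change : Prop := ∀ (relatives_list : List (List (String × Int))), Dom_relatives_list_change relatives_list → Pre_relatives_list_change relatives_list → Spec_relatives_list_change relatives_list (relatives_list_change relatives_list)

-- ===== LEMMAS AND PROOFS =====

-- the id / relative_id of one element
def pvKey (i : List (String × Int)) : Int := ((PySem.Dict.mk i).get? "id").getD 0
def pvRid (i : List (String × Int)) : Int := ((PySem.Dict.mk i).get? "relative_id").getD 0

-- A's loop body is a single 'modify' in both branches
theorem stepA_eq_modify (d : PySem.Dict Int (List Int)) (k r : Int) :
    (if d.contains k then d.modify k [] (fun v => v ++ [r])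
     else (d.insert k []).modify k [] (fun v => v ++ [r]))
      = d.modify k [] (fun v => v ++ [r]) := by
  by_cases h : d.contains k
  · simp [h]
  · simp only [Bool.not_eq_true] at h
    rw [PySem.Dict.modify, PySem.Dict.modify, PySem.Dict.getD_insert_self,
        PySem.Dict.getD_of_not_contains _ _ h, PySem.Dict.insert_insert_self]
    simp [h]

theorem relatives_list_change_eq_fold (relatives_list : List (List (String × Int))) :
    relatives_list_change relatives_list
      = ((relatives_list.map (fun i => (pvKey i, pvRid i))).foldl
           (fun d p => d.modify p.1 [] (fun v => v ++ [p.2])) PySem.Dict.empty).items := by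
  unfold relatives_list_change
  rw [List.foldl_map]
  congr 1
  apply PySem.List.foldl_congr_mem
  intro d i _
  exact stepA_eq_modify d (pvKey i) (pvRid i)

theorem relatives_list_change_spec_aux (relatives_list : List (List (String × Int))) :
    relatives_list_change relatives_list = relatives_list_change_alt relatives_list := by
  rw [relatives_list_change_eq_fold]
  set l := relatives_list.map (fun i => (pvKey i, pvRid i)) with hl
  have hnd : ((l.foldl (fun d p => d.modify p.1 [] (fun v => v ++ [p.2])) PySem.Dict.empty)).keys.Nodup := by
    exact PySem.Dict.nodup_keys_foldl_modify_key l Prod.fst [] (fun d p v => v ++ [p.2]) _ (by simp)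
  rw [PySem.Dict.items_eq_map_keys _ hnd []]
  have hkeys : ((l.foldl (fun d p => d.modify p.1 [] (fun v => v ++ [p.2])) PySem.Dict.empty)).keys
      = PySem.Set.update (PySem.Dict.empty : PySem.Dict Int (List Int)).keys (l.map Prod.fst) := by
    exact PySem.Dict.keys_foldl_modify_key l Prod.fst [] (fun d p v => v ++ [p.2]) _
  rw [hkeys]
  unfold relatives_list_change_alt
  have hids : PySem.Set.update (PySem.Dict.empty : PySem.Dict Int (List Int)).keys (l.map Prod.fst)
      = PySem.List.dedup (relatives_list.map (fun i => ((PySem.Dict.mk i).get? "id").getD 0)) := by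
    have : l.map Prod.fst = relatives_list.map (fun i => ((PySem.Dict.mk i).get? "id").getD 0) := by
      simp [hl, pvKey, Function.comp]
    rw [this]
    simp [PySem.List.dedup_eq_ofList, PySem.Set.ofList_eq_foldl, PySem.Set.update,
          PySem.Dict.keys_empty]
  rw [hids]
  apply List.map_congr_left
  intro k _
  have hv := PySem.Dict.getD_foldl_modify_append l (PySem.Dict.empty : PySem.Dict Int (List Int)) k
  rw [hv]
  have hfil : l.filter (fun p => p.1 == k)
      = (relatives_list.filter (fun i => ((PySem.Dict.mk i).get? "id").getD 0 == k)).map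
          (fun i => (pvKey i, pvRid i)) := by
    rw [hl, List.filter_map]
    congr 1
  rw [hfil]
  simp [pvRid, Function.comp]

-- ===== VERDICT (by name: the statement is the Claim_ definition above) =====
theorem relatives_list_change_spec : Claim_equal_relatives_list_change := by
  intro xs _ _
  unfold Spec_relatives_list_change
  exact relatives_list_change_spec_aux xs
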